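-- pv_equiv track=rewrite | github.com/RusianHu/Huu-Note | app/editor/markdown_editor.py | direct_html_preview
-- ===== SOURCE A (Python) =====
-- def direct_html_preview(content):
--     """
--     直接预览HTML内容，用于处理复杂的HTML内容如SVG
--     """
--     # 提取HTML块
--     html_blocks = []
--     in_html_block = False
--     current_block = []
--
--     for line in content.split('\n'):
--         if line.strip().startswith('<') and not in_html_block:
--             in_html_block = True
--             current_block = [line]
--         elif in_html_block:
--             current_block.append(line)
--             if line.strip().startswith('</'):
--                 html_blocks.append('\n'.join(current_block))
--                 in_html_block = False
--
--     return '\n'.join(html_blocks)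
-- ===== SOURCE B (Python) =====
-- def direct_html_preview(content):
--     """
--     直接预览HTML内容，用于处理复杂的HTML内容如SVG
--     """
--     lines = content.split('\n')
--     n = len(lines)
--     blocks = []
--     i = 0
--     while i < n:
--         if lines[i].strip().startswith('<'):
--             block = [lines[i]]
--             j = i + 1
--             closed = False
--             while j < n:
--                 block.append(lines[j])
--                 if lines[j].strip().startswith('</'):
--                     closed = True
--                     break
--                 j += 1
--             if closed:
--                 blocks.append('\n'.join(block))
--             i = j + 1
--         else:
--             i += 1
--     return '\n'.join(blocks)
-- ===== Notes on version B (the rewrite author's own statement) =====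
-- stated objective: alternative
-- what changed: Replaces A's single pass with a boolean in-block state flag by an explicit cursor with nested loops: an outer scan advances to an opening line, an inner scan consumes lines until a closing line (emitting the joined block) or drops an unclosed trailing block, and the outer scan resumes after the closing line.
import Mathlib
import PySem

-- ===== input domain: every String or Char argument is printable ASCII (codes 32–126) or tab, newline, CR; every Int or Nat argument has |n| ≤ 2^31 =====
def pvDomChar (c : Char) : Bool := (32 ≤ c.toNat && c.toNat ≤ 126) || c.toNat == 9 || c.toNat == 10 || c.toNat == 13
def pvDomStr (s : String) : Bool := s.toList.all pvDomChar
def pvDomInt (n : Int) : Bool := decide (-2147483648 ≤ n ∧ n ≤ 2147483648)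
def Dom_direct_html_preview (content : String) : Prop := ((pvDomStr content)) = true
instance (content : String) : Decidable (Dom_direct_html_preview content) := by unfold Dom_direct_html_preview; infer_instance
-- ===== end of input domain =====

-- B is an alternative decomposition: an explicit cursor with nested loops (outer scan to an
-- opening line, inner scan to the closing line) instead of A's boolean state flag; same cost.

-- ===== PORT A =====
-- line.strip().startswith('<') / ('</'), shared vocabulary of both ports
def dhpOp (l : String) : Bool := PySem.Str.startswith (PySem.Str.strip l) "<"
def dhpCl (l : String) : Bool := PySem.Str.startswith (PySem.Str.strip l) "</"

-- one step of A's for-loop over lines, state = (html_blocks, in_html_block, current_block)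
def dhpStep (st : List String × Bool × List String) (line : String) :
    List String × Bool × List String :=
  let (blocks, inb, cur) := st
  if dhpOp line && !inb then
    (blocks, true, [line])
  else if inb then
    let cur' := cur ++ [line]
    if dhpCl line then
      (blocks ++ [PySem.Str.join "\n" cur'], false, cur')
    else (blocks, true, cur')
  else st

def direct_html_preview (content : String) : String :=
  PySem.Str.join "\n" (((PySem.Str.split? content "\n").getD []).foldl dhpStep ([], false, [])).1

-- ===== PORT B =====
-- inner while loop: consume lines into the block until a closing line; returns the emitted
-- block (if closed) and the lines after the closing line
def dhpInner (block : List String) (rest : List String) : Option String × List String :=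
  match rest with
  | [] => (none, [])
  | l :: ls =>
    let block' := block ++ [l]
    if dhpCl l then
      (some (PySem.Str.join "\n" block'), ls)
    else dhpInner block' ls

-- needed by dhpOuter's termination proof
theorem dhpInner_len (block rest : List String) :
    (dhpInner block rest).2.length ≤ rest.length := by
  induction rest generalizing block with
  | nil => simp [dhpInner]
  | cons l ls ih =>
    simp only [dhpInner]
    split
    · simp
    · exact Nat.le_trans (ih _) (Nat.le_succ _)

-- outer while loop: advance the cursor to an opening line, run the inner loop, resume after it
def dhpOuter (lines : List String) : List String :=
  match lines with
  | [] => []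
  | l :: ls =>
    if dhpOp l then
      match h : dhpInner [l] ls with
      | (some b, rest) => b :: dhpOuter rest
      | (none, _) => []
    else dhpOuter ls
termination_by lines.length
decreasing_by
  · have := dhpInner_len [l] ls
    rw [h] at this
    exact Nat.lt_succ_of_le this
  · simp

def direct_html_preview_alt (content : String) : String :=
  PySem.Str.join "\n" (dhpOuter ((PySem.Str.split? content "\n").getD []))

-- ===== PRECONDITION & SPEC =====
def Spec_direct_html_preview (content : String) (out : String) : Prop := out = direct_html_preview_alt content
instance (content : String) (out : String) : Decidable (Spec_direct_html_preview content out) := by unfold Spec_direct_html_preview; infer_instance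

-- ===== CLAIM (what is proved, stated in full; the proofs are below) =====
def Claim_equal_direct_html_preview : Prop := ∀ (content : String), Dom_direct_html_preview content → Spec_direct_html_preview content (direct_html_preview content)

-- ===== LEMMAS AND PROOFS =====

-- what B's inner result contributes to the output stream
def dhpEmit (cur : List String) (lines : List String) : List String :=
  match dhpInner cur lines with
  | (some b, rest) => b :: dhpOuter rest
  | (none, _) => []

-- A's fold from either state computes B's nested-loop result, for any accumulator
theorem dhpFold_eq (lines : List String) :
    (∀ blocks cur, ((lines.foldl dhpStep (blocks, false, cur)).1 = blocks ++ dhpOuter lines)) ∧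
    (∀ blocks cur, ((lines.foldl dhpStep (blocks, true, cur)).1 = blocks ++ dhpEmit cur lines)) := by
  induction lines with
  | nil => simp [dhpEmit, dhpInner, dhpOuter]
  | cons l ls ih =>
    constructor
    · intro blocks cur
      by_cases hop : dhpOp l
      · simp only [List.foldl_cons, dhpStep, hop, Bool.not_false, Bool.and_true, if_pos]
        rw [ih.2 blocks [l], dhpOuter]
        simp only [hop, if_pos]
        unfold dhpEmit
        rcases h : dhpInner [l] ls with ⟨ob, rest⟩
        cases ob <;> simp
      · simp only [List.foldl_cons, dhpStep, hop]
        simpa [dhpOuter, hop] using ih.1 blocks cur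
    · intro blocks cur
      by_cases hcl : dhpCl l
      · simp only [List.foldl_cons, dhpStep, Bool.and_false, Bool.not_true, if_neg, hcl,
          if_pos, Bool.false_eq_true, not_false_eq_true]
        rw [ih.1]
        unfold dhpEmit dhpInner
        simp [hcl]
      · simp only [List.foldl_cons, dhpStep, Bool.and_false, Bool.not_true, if_neg, hcl,
          Bool.false_eq_true, not_false_eq_true, if_true]
        rw [ih.2 blocks (cur ++ [l])]
        unfold dhpEmit
        conv_rhs => rw [dhpInner]
        simp [hcl]

-- ===== VERDICT (by name: the statement is the Claim_ definition above) =====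
theorem direct_html_preview_spec : Claim_equal_direct_html_preview := by
  intro content _
  unfold Spec_direct_html_preview direct_html_preview direct_html_preview_alt
  rw [(dhpFold_eq _).1 [] []]
  rfl
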